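-- pv_equiv track=rewrite | github.com/CMCFame/ModularSIGBot | app/helpers.py | validate_location_name
-- ===== SOURCE A (Python) =====
-- def validate_location_name(name):
--     """Validate that location name follows ARCOS requirements
--
--     Rules:
--     - Must contain a blank space per 25 contiguous characters
--     - Maximum length of 50 characters
--     """
--     if len(name) > 50:
--         return False, "Location name exceeds maximum length of 50 characters"
--
--     # Check for blank space per 25 contiguous characters
--     chars_without_space = 0
--     for char in name:
--         if char == ' ':
--             chars_without_space = 0
--         else:
--             chars_without_space += 1
--             if chars_without_space > 25:
--                 return False, "Location name must contain a blank space per 25 contiguous characters"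
--
--     return True, "Valid location name"
-- ===== SOURCE B (Python) =====
-- def validate_location_name(name):
--     """Validate that location name follows ARCOS requirements
--
--     Rules:
--     - Must contain a blank space per 25 contiguous characters
--     - Maximum length of 50 characters
--     """
--     if len(name) > 50:
--         return False, "Location name exceeds maximum length of 50 characters"
--     if any(len(segment) > 25 for segment in name.split(' ')):
--         return False, "Location name must contain a blank space per 25 contiguous characters"
--     return True, "Valid location name"
-- ===== Notes on version B (the rewrite author's own statement) =====
-- stated objective: simpler
-- what changed: Replaces the streaming reset-on-space counter with splitting the name on single spaces and checking whether any resulting segment is longer than 25 characters.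
import Mathlib
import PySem

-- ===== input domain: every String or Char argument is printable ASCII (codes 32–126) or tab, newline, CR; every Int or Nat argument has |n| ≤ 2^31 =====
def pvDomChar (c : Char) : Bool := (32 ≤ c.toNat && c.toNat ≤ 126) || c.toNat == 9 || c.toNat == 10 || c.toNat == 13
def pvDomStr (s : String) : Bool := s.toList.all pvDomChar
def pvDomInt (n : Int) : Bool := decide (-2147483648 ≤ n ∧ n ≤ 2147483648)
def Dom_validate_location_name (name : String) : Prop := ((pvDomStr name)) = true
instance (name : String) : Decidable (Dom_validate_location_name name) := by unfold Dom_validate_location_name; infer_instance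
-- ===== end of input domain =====

-- B replaces A's streaming reset-on-space counter by splitting on ' ' and checking segment lengths (simpler decomposition).

-- ===== PORT A =====
-- the for-loop of A: counter of chars since the last space, early return on overflow (none = fell through)
def vlnLoopA : Nat → List Char → Option (Bool × String)
  | _, [] => none
  | c, ch :: t =>
    if ch = ' ' then vlnLoopA 0 t
    else if 25 < c + 1 then
      some (false, "Location name must contain a blank space per 25 contiguous characters")
    else vlnLoopA (c + 1) t

def validate_location_name (name : String) : Bool × String :=
  if 50 < name.toList.length then
    (false, "Location name exceeds maximum length of 50 characters")
  else
    match vlnLoopA 0 name.toList with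
    | some r => r
    | none => (true, "Valid location name")

-- ===== PORT B =====
def validate_location_name_alt (name : String) : Bool × String :=
  if 50 < name.toList.length then
    (false, "Location name exceeds maximum length of 50 characters")
  else if (PySem.Chars.splitOn name.toList [' ']).any (fun seg => decide (25 < seg.length)) then
    (false, "Location name must contain a blank space per 25 contiguous characters")
  else
    (true, "Valid location name")

-- ===== PRECONDITION & SPEC =====
def Spec_validate_location_name (name : String) (out : Bool × String) : Prop := out = validate_location_name_alt name
instance (name : String) (out : Bool × String) : Decidable (Spec_validate_location_name name out) := by unfold Spec_validate_location_name; infer_instance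

-- ===== CLAIM (what is proved, stated in full; the proofs are below) =====
def Claim_equal_validate_location_name : Prop := ∀ (name : String), Dom_validate_location_name name → Spec_validate_location_name name (validate_location_name name)

-- ===== LEMMAS AND PROOFS =====

-- structural characterization of splitting on a single space
def vlnSegs : List Char → List (List Char)
  | [] => [[]]
  | c :: t => if c = ' ' then [] :: vlnSegs t else (c :: (vlnSegs t).headI) :: (vlnSegs t).tail

theorem vlnSegs_ne_nil (l : List Char) : vlnSegs l ≠ [] := by
  cases l with
  | nil => simp [vlnSegs]
  | cons c t => simp only [vlnSegs]; split <;> simp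

theorem vln_go_eq (fuel : Nat) : ∀ (l cur : List Char) (_ : l.length ≤ fuel) (acc' : List (List Char)),
    PySem.Chars.splitOn.go [' '] fuel l cur acc' =
      acc'.reverse ++ ((cur.reverse ++ (vlnSegs l).headI) :: (vlnSegs l).tail) := by
  induction fuel with
  | zero =>
    intro l cur h acc'
    have hl : l = [] := List.length_eq_zero_iff.mp (Nat.le_zero.mp h)
    subst hl
    simp [PySem.Chars.splitOn.go, vlnSegs]
  | succ f ih =>
    intro l cur h acc'
    cases l with
    | nil => simp [PySem.Chars.splitOn.go, vlnSegs]
    | cons c rest =>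
      by_cases hc : c = ' '
      · subst hc
        simp only [PySem.Chars.splitOn.go, List.isPrefixOf, BEq.rfl, Bool.true_and, if_true]
        have hd : List.drop [' '].length (' ' :: rest) = rest := rfl
        rw [hd, ih rest [] (by simpa using Nat.succ_le_succ_iff.mp h) (cur.reverse :: acc')]
        obtain ⟨s, r, hsr⟩ := List.exists_cons_of_ne_nil (vlnSegs_ne_nil rest)
        simp [vlnSegs, hsr]
      · have hpre : [' '].isPrefixOf (c :: rest) = false := by
          simp [List.isPrefixOf]
          intro h'; exact hc h'.symm
        simp only [PySem.Chars.splitOn.go, hpre, Bool.false_eq_true, if_false]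
        rw [ih rest (c :: cur) (by simpa using Nat.succ_le_succ_iff.mp h) acc']
        simp [vlnSegs, hc]

theorem vln_splitOn_eq (l : List Char) : PySem.Chars.splitOn l [' '] = vlnSegs l := by
  unfold PySem.Chars.splitOn
  rw [vln_go_eq (l.length + 1) l [] (by omega) []]
  obtain ⟨s, r, hsr⟩ := List.exists_cons_of_ne_nil (vlnSegs_ne_nil l)
  simp [hsr]

-- the loop either falls through (none) or returns the spacing error, exactly when some segment overflows
theorem vln_loop_eq (l : List Char) : ∀ (c : Nat), c ≤ 25 →
    vlnLoopA c l =
      if 25 < c + (vlnSegs l).headI.length ∨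
          (vlnSegs l).tail.any (fun s => decide (25 < s.length)) = true then
        some (false, "Location name must contain a blank space per 25 contiguous characters")
      else none := by
  induction l with
  | nil =>
    intro c hc
    have hcond : ¬ (25 < c + (vlnSegs ([] : List Char)).headI.length ∨
        (vlnSegs ([] : List Char)).tail.any (fun s => decide (25 < s.length)) = true) := by
      simp [vlnSegs]; omega
    rw [if_neg hcond]
    rfl
  | cons ch t ih =>
    intro c hc
    obtain ⟨s, r, hsr⟩ := List.exists_cons_of_ne_nil (vlnSegs_ne_nil t)
    by_cases hch : ch = ' '
    · subst hch
      simp only [vlnLoopA, if_true, vlnSegs, List.headI_cons, List.tail_cons]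
      rw [ih 0 (by omega)]
      refine if_congr ?_ rfl rfl
      rw [hsr]
      simp only [List.headI_cons, List.tail_cons, List.any_cons, Bool.or_eq_true,
        decide_eq_true_eq, Nat.zero_add, List.length_nil, Nat.add_zero]
      have hnc : ¬ 25 < c := by omega
      tauto
    · simp only [vlnLoopA, hch, if_false, vlnSegs, List.headI_cons, List.tail_cons]
      by_cases hover : 25 < c + 1
      · rw [if_pos hover, if_pos (Or.inl (by simp only [List.length_cons]; omega))]
      · rw [if_neg hover]
        rw [ih (c + 1) (by omega)]
        refine if_congr ?_ rfl rfl
        simp only [List.length_cons]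
        constructor
        · rintro (h | h)
          · left; omega
          · right; exact h
        · rintro (h | h)
          · left; omega
          · right; exact h

-- ===== VERDICT (by name: the statement is the Claim_ definition above) =====
theorem validate_location_name_spec : Claim_equal_validate_location_name := by
  unfold Claim_equal_validate_location_name
  intro name _
  unfold Spec_validate_location_name validate_location_name validate_location_name_alt
  by_cases hlen : 50 < name.toList.length
  · rw [if_pos hlen, if_pos hlen]
  · rw [if_neg hlen, if_neg hlen]
    rw [vln_loop_eq name.toList 0 (by omega), vln_splitOn_eq]
    obtain ⟨s, r, hsr⟩ := List.exists_cons_of_ne_nil (vlnSegs_ne_nil name.toList)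
    rw [hsr]
    simp only [List.headI_cons, List.tail_cons, Nat.zero_add]
    by_cases hbad : 25 < s.length ∨ (r.any fun x => decide (25 < x.length)) = true
    · have hb : ((s :: r).any fun seg => decide (25 < seg.length)) = true := by
        simp only [List.any_cons, Bool.or_eq_true, decide_eq_true_eq]
        tauto
      rw [if_pos hbad, if_pos hb]
    · have hb : ¬ ((s :: r).any fun seg => decide (25 < seg.length)) = true := by
        simp only [List.any_cons, Bool.or_eq_true, decide_eq_true_eq]
        tauto
      rw [if_neg hbad, if_neg hb]
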